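-- pv_equiv track=rewrite | github.com/MGwave/dblp_reader | HeteRecmTest/IMDB/test.py | transform
-- ===== SOURCE A (Python) =====
-- def transform(metaPath, edgeTypeDict):
--     nodeTypeMetaPath = []
--     pathLength = len(metaPath)
--     for i in range(0, pathLength):
--         edgeType = metaPath[i]
--         nodeType = []
--         if edgeType > 0:
--             nodeType = edgeTypeDict[edgeType].strip().split("_")
--         else:
--             nodeType = edgeTypeDict[-edgeType].strip().split("_")
--             nodeType.reverse()
--
--         nodeTypeMetaPath.append(nodeType[0])
--         if i == pathLength - 1:
--             nodeTypeMetaPath.append(nodeType[1])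
--     return nodeTypeMetaPath
-- ===== SOURCE B (Python) =====
-- def transform(metaPath, edgeTypeDict):
--     # Structural recursion on the metapath: no index arithmetic, no pathLength,
--     # no last-iteration flag -- the singleton is the base case emitting both tokens.
--     if not metaPath:
--         return []
--     e, rest = metaPath[0], metaPath[1:]
--     if e > 0:
--         t = edgeTypeDict[e].strip().split("_")
--     else:
--         t = edgeTypeDict[-e].strip().split("_")[::-1]
--     if not rest:
--         return [t[0], t[1]]
--     return [t[0]] + transform(rest, edgeTypeDict)
-- ===== Notes on version B (the rewrite author's own statement) =====
-- stated objective: alternative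
-- what changed: Replaces A's index loop over range(len(metaPath)) with its in-loop 'i == pathLength-1' flag by structural recursion on the list: each step emits the head token and recurses on the tail, with the singleton path as the base case emitting both tokens.
import Mathlib
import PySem

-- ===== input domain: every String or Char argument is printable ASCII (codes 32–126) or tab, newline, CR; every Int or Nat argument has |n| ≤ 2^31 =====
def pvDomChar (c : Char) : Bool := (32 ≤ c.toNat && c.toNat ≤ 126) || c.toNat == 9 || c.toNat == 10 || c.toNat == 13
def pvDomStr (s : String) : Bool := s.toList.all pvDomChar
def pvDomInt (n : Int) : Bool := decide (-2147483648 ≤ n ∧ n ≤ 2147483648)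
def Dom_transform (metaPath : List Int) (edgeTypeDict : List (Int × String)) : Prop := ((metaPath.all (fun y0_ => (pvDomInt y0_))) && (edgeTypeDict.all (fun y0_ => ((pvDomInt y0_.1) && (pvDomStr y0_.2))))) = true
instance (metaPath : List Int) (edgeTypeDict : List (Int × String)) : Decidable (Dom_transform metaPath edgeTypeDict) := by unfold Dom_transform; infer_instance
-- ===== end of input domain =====

-- B replaces A's index loop with its 'i == pathLength-1' flag by structural recursion
-- on the metapath (singleton base case emits both tokens); same cost, different decomposition.

-- shared helper: edgeTypeDict[k] (dict lookup = first match; "" never used inside Pre_)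
def pvLookup (edgeTypeDict : List (Int × String)) (k : Int) : String :=
  ((edgeTypeDict.find? (fun p => p.1 == k)).map (·.2)).getD ""

-- shared helper: the oriented split 'edgeTypeDict[e].strip().split("_")' (reversed for e ≤ 0)
def pvOriented (edgeTypeDict : List (Int × String)) (e : Int) : List String :=
  if e > 0 then (PySem.Str.split? (PySem.Str.strip (pvLookup edgeTypeDict e)) "_").getD []
  else ((PySem.Str.split? (PySem.Str.strip (pvLookup edgeTypeDict (-e))) "_").getD []).reverse

-- ===== PORT A =====
def transform (metaPath : List Int) (edgeTypeDict : List (Int × String)) : List String :=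
  let pathLength := metaPath.length
  (List.range pathLength).foldl (fun nodeTypeMetaPath i =>
    let nodeType := pvOriented edgeTypeDict (metaPath.getD i 0)
    let nodeTypeMetaPath := nodeTypeMetaPath ++ [nodeType.headD ""]
    if i = pathLength - 1 then nodeTypeMetaPath ++ [nodeType.getD 1 ""]
    else nodeTypeMetaPath) []

-- ===== PORT B =====
def transform_alt (metaPath : List Int) (edgeTypeDict : List (Int × String)) : List String :=
  match metaPath with
  | [] => []
  | e :: rest =>
    let t := pvOriented edgeTypeDict e
    match rest with
    | [] => [t.headD "", t.getD 1 ""]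
    | _ :: _ => [t.headD ""] ++ transform_alt rest edgeTypeDict

-- ===== PRECONDITION & SPEC =====
-- Pre_ excludes exactly the inputs where the Python A raises: a metapath edge whose
-- (sign-adjusted) key is missing from edgeTypeDict (KeyError), and a last edge whose
-- oriented split has fewer than two tokens (IndexError on nodeType[1]).
def Pre_transform (metaPath : List Int) (edgeTypeDict : List (Int × String)) : Prop :=
  (∀ e ∈ metaPath, (edgeTypeDict.find? (fun p => p.1 == (if e > 0 then e else -e))).isSome = true) ∧
  (∀ l ∈ metaPath.getLast?, 2 ≤ (pvOriented edgeTypeDict l).length)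
instance (metaPath : List Int) (edgeTypeDict : List (Int × String)) : Decidable (Pre_transform metaPath edgeTypeDict) := by unfold Pre_transform; infer_instance

def pvWitness_transform : List Int × (List (Int × String)) := ([1, -2], [(1, "A_B"), (2, " B_C ")])

def Spec_transform (metaPath : List Int) (edgeTypeDict : List (Int × String)) (out : List String) : Prop := out = transform_alt metaPath edgeTypeDict
instance (metaPath : List Int) (edgeTypeDict : List (Int × String)) (out : List String) : Decidable (Spec_transform metaPath edgeTypeDict out) := by unfold Spec_transform; infer_instance

-- ===== CLAIM (what is proved, stated in full; the proofs are below) =====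
def Claim_equal_transform : Prop := ∀ (metaPath : List Int) (edgeTypeDict : List (Int × String)), Dom_transform metaPath edgeTypeDict → Pre_transform metaPath edgeTypeDict → Spec_transform metaPath edgeTypeDict (transform metaPath edgeTypeDict)

-- ===== LEMMAS AND PROOFS =====

-- map over indices equals map over the list
theorem pvMapRangeGetD {α β : Type} (f : α → β) (d0 : α) :
    ∀ (l : List α), (List.range l.length).map (fun i => f (l.getD i d0)) = l.map f := by
  intro l
  induction l with
  | nil => simp
  | cons a t ih =>
    simp only [List.length_cons, List.range_succ_eq_map, List.map_cons, List.map_map]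
    simpa using ih

-- B's recursion computes: heads of all oriented splits, then the last split's second token
theorem pvAltChar (edgeTypeDict : List (Int × String)) :
    ∀ (l : List Int) (e : Int),
      transform_alt (e :: l) edgeTypeDict
        = (e :: l).map (fun x => (pvOriented edgeTypeDict x).headD "")
          ++ [(pvOriented edgeTypeDict ((e :: l).getLastD 0)).getD 1 ""] := by
  intro l
  induction l with
  | nil => intro e; simp [transform_alt]
  | cons a t ih =>
    intro e
    have hstep : transform_alt (e :: a :: t) edgeTypeDict
        = [(pvOriented edgeTypeDict e).headD ""] ++ transform_alt (a :: t) edgeTypeDict := rfl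
    rw [hstep, ih a]
    simp [List.getLastD_cons]

theorem transform_eq_alt (metaPath : List Int) (edgeTypeDict : List (Int × String)) :
    transform metaPath edgeTypeDict = transform_alt metaPath edgeTypeDict := by
  cases h : metaPath.length with
  | zero =>
    have hnil : metaPath = [] := List.length_eq_zero_iff.mp h
    subst hnil; rfl
  | succ m =>
    have hne : metaPath ≠ [] := by
      intro hn; rw [hn] at h; simp at h
    set g : ℕ → List String := fun i => pvOriented edgeTypeDict (metaPath.getD i 0) with hg
    -- A side: fold = flatMap, range (m+1) = range m ++ [m], branch false below m
    have hA : transform metaPath edgeTypeDict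
        = (List.range m).map (fun i => (g i).headD "") ++ [(g m).headD "", (g m).getD 1 ""] := by
      unfold transform
      rw [h]
      have hstep : ∀ (acc : List String) (i : ℕ),
          (fun nodeTypeMetaPath i =>
            let nodeType := pvOriented edgeTypeDict (metaPath.getD i 0)
            let nodeTypeMetaPath := nodeTypeMetaPath ++ [nodeType.headD ""]
            if i = m + 1 - 1 then nodeTypeMetaPath ++ [nodeType.getD 1 ""]
            else nodeTypeMetaPath) acc i
          = acc ++ ([(g i).headD ""] ++ if i = m then [(g i).getD 1 ""] else []) := by
        intro acc i
        simp only [hg, Nat.add_sub_cancel]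
        split <;> simp
      calc (List.range (m + 1)).foldl (fun nodeTypeMetaPath i =>
              let nodeType := pvOriented edgeTypeDict (metaPath.getD i 0)
              let nodeTypeMetaPath := nodeTypeMetaPath ++ [nodeType.headD ""]
              if i = m + 1 - 1 then nodeTypeMetaPath ++ [nodeType.getD 1 ""]
              else nodeTypeMetaPath) []
          = (List.range (m + 1)).foldl (fun acc i =>
              acc ++ ([(g i).headD ""] ++ if i = m then [(g i).getD 1 ""] else [])) [] := by
            apply PySem.List.foldl_congr_mem
            intro acc i _
            exact hstep acc i
        _ = (List.range (m + 1)).flatMap (fun i =>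
              [(g i).headD ""] ++ if i = m then [(g i).getD 1 ""] else []) := by
            simpa using PySem.List.foldl_append_eq_flatMap
              (l := List.range (m + 1))
              (g := fun i => [(g i).headD ""] ++ if i = m then [(g i).getD 1 ""] else [])
              (acc := ([] : List String))
        _ = (List.range m).map (fun i => (g i).headD "") ++ [(g m).headD "", (g m).getD 1 ""] := by
            rw [List.range_succ, List.flatMap_append]
            congr 1
            · rw [List.flatMap_eq_foldl]
              have : ∀ i ∈ List.range m,
                  ([(g i).headD ""] ++ if i = m then [(g i).getD 1 ""] else [])
                  = [(g i).headD ""] := by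
                intro i hi
                have him : i < m := List.mem_range.mp hi
                simp [Nat.ne_of_lt him]
              calc (List.range m).foldl (fun acc i =>
                      acc ++ ([(g i).headD ""] ++ if i = m then [(g i).getD 1 ""] else [])) []
                  = (List.range m).foldl (fun acc i => acc ++ [(g i).headD ""]) [] := by
                    apply PySem.List.foldl_congr_mem
                    intro acc i hi
                    rw [this i hi]
                _ = (List.range m).map (fun i => (g i).headD "") := by
                    simpa using PySem.List.foldl_append_singleton_eq_map
                      (l := List.range m) (f := fun i => (g i).headD "") (acc := ([] : List String))
            · simp
    -- B side: the recursion's characterisation, with last element = metaPath.getD m 0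
    obtain ⟨e, l, rfl⟩ := List.exists_cons_of_ne_nil hne
    have hlast : (e :: l).getLastD 0 = (e :: l).getD m 0 := by
      rw [List.getLastD_eq_getLast?, List.getLast?_eq_getElem?]
      have hm : (e :: l).length - 1 = m := by omega
      rw [hm, List.getD_eq_getElem?_getD]
    have hB := pvAltChar edgeTypeDict l e
    rw [hA, hB, hlast]
    rw [← pvMapRangeGetD (fun x => (pvOriented edgeTypeDict x).headD "") 0 (e :: l), h,
        List.range_succ, List.map_append]
    simp [hg]

-- ===== VERDICT (by name: the statement is the Claim_ definition above) =====
theorem transform_spec : Claim_equal_transform := by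
  intro metaPath edgeTypeDict _ _
  unfold Spec_transform
  exact transform_eq_alt metaPath edgeTypeDict
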